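-- pv_equiv track=rewrite | github.com/MateusDG/Grafos-Caminho-Mais-Curto | busca_largura.py | encontrar_pontos
-- ===== SOURCE A (Python) =====
-- def encontrar_pontos(pixels, largura, altura):
--     cor_inicio = (255, 0, 0)  # Vermelho
--     cor_destino = (0, 255, 0)  # Verde
--     ponto_inicio = ponto_destino = None
--
--     matriz = [pixels[i * largura:(i + 1) * largura] for i in range(altura)]
--     for y in range(altura):
--         for x in range(largura):
--             if matriz[y][x] == cor_inicio:
--                 ponto_inicio = (x, y)
--             elif matriz[y][x] == cor_destino:
--                 ponto_destino = (x, y)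
--
--     return matriz, ponto_inicio, ponto_destino
-- ===== SOURCE B (Python) =====
-- def encontrar_pontos(pixels, largura, altura):
--     matriz = [pixels[i * largura:(i + 1) * largura] for i in range(altura)]
--     ponto_inicio = ponto_destino = None
--     if largura > 0:
--         # reverse scan of the flat pixel area: first hit in reverse = last hit forward
--         for i in range(largura * altura - 1, -1, -1):
--             p = pixels[i]
--             if ponto_inicio is None and p == (255, 0, 0):
--                 ponto_inicio = (i % largura, i // largura)
--             elif ponto_destino is None and p == (0, 255, 0):
--                 ponto_destino = (i % largura, i // largura)
--             if ponto_inicio is not None and ponto_destino is not None: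
--                 break
--     return matriz, ponto_inicio, ponto_destino
-- ===== Notes on version B (the rewrite author's own statement) =====
-- stated objective: alternative
-- what changed: Replaces A's forward nested y/x loop that keeps overwriting the two points with a single reverse scan over the flat pixel area that records each point on its first reverse-order hit (guarded by found-flags), breaking as soon as both are found, and computing coordinates as (i % largura, i // largura).
import Mathlib
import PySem

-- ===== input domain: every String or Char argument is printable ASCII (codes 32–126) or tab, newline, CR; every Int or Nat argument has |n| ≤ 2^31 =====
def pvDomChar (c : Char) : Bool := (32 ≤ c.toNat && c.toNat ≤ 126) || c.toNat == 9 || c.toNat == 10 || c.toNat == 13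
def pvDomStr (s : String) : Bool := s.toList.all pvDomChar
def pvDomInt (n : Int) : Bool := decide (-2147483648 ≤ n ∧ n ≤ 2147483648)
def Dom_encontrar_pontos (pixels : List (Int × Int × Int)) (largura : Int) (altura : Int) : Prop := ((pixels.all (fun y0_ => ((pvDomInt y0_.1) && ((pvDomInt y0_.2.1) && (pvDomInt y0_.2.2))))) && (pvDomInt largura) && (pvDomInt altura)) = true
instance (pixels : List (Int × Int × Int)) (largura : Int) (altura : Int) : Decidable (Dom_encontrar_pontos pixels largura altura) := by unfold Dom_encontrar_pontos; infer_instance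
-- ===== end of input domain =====

-- B replaces A's forward nested y/x overwrite loop with a single reverse scan of the
-- flat pixel area with found-flags and an early break (alternative decomposition, not claimed faster).

-- ===== PORT A =====
def encontrar_pontos (pixels : List (Int × Int × Int)) (largura : Int) (altura : Int) : (List (List (Int × Int × Int))) × (Option (Int × Int)) × (Option (Int × Int)) :=
  let cor_inicio : Int × Int × Int := (255, 0, 0)
  let cor_destino : Int × Int × Int := (0, 255, 0)
  let matriz := (PySem.List.pyRange 0 altura 1).map
    (fun i => PySem.List.slice pixels (some (i * largura)) (some ((i + 1) * largura)))
  let st := (PySem.List.pyRange 0 altura 1).foldl (fun st y =>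
    (PySem.List.pyRange 0 largura 1).foldl (fun st x =>
      -- matriz[y][x]: in range on every input admitted by Pre_; the default is never read
      let cell := PySem.List.pyGetD (PySem.List.pyGetD matriz y []) x (0, 0, 0)
      if cell = cor_inicio then (some (x, y), st.2)
      else if cell = cor_destino then (st.1, some (x, y))
      else st) st)
    ((none, none) : Option (Int × Int) × Option (Int × Int))
  (matriz, st)

-- ===== PORT B =====
-- B's reverse loop with early break, as structural recursion over the index list
def pvAltLoop (pixels : List (Int × Int × Int)) (largura : Int) :
    List Int → Option (Int × Int) → Option (Int × Int) → Option (Int × Int) × Option (Int × Int)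
  | [], pi_, pd_ => (pi_, pd_)
  | i :: rest, pi_, pd_ =>
    -- pixels[i]: in range on every input admitted by Pre_; the default is never read
    let p := PySem.List.pyGetD pixels i (0, 0, 0)
    let st :=
      if pi_ = none ∧ p = (255, 0, 0) then
        (some (PySem.Int.mod i largura, PySem.Int.floordiv i largura), pd_)
      else if pd_ = none ∧ p = (0, 255, 0) then
        (pi_, some (PySem.Int.mod i largura, PySem.Int.floordiv i largura))
      else (pi_, pd_)
    if st.1 ≠ none ∧ st.2 ≠ none then st
    else pvAltLoop pixels largura rest st.1 st.2

def encontrar_pontos_alt (pixels : List (Int × Int × Int)) (largura : Int) (altura : Int) : (List (List (Int × Int × Int))) × (Option (Int × Int)) × (Option (Int × Int)) :=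
  let matriz := (PySem.List.pyRange 0 altura 1).map
    (fun i => PySem.List.slice pixels (some (i * largura)) (some ((i + 1) * largura)))
  let st :=
    if 0 < largura then
      pvAltLoop pixels largura (PySem.List.pyRange (largura * altura - 1) (-1) (-1)) none none
    else ((none, none) : Option (Int × Int) × Option (Int × Int))
  (matriz, st)

-- ===== PRECONDITION & SPEC =====
-- Pre_ excludes exactly the inputs where A raises IndexError (matrix rows shorter than largura);
-- B raises there as well.
def Pre_encontrar_pontos (pixels : List (Int × Int × Int)) (largura : Int) (altura : Int) : Prop :=
  largura ≤ 0 ∨ altura ≤ 0 ∨ largura * altura ≤ (pixels.length : Int)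
instance (pixels : List (Int × Int × Int)) (largura : Int) (altura : Int) : Decidable (Pre_encontrar_pontos pixels largura altura) := by unfold Pre_encontrar_pontos; infer_instance
def pvWitness_encontrar_pontos : (List (Int × Int × Int)) × Int × Int :=
  ([(255, 0, 0), (0, 255, 0)], 2, 1)
def Spec_encontrar_pontos (pixels : List (Int × Int × Int)) (largura : Int) (altura : Int) (out : (List (List (Int × Int × Int))) × (Option (Int × Int)) × (Option (Int × Int))) : Prop := out = encontrar_pontos_alt pixels largura altura
instance (pixels : List (Int × Int × Int)) (largura : Int) (altura : Int) (out : (List (List (Int × Int × Int))) × (Option (Int × Int)) × (Option (Int × Int))) : Decidable (Spec_encontrar_pontos pixels largura altura out) := by unfold Spec_encontrar_pontos; infer_instance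

-- ===== CLAIM (what is proved, stated in full; the proofs are below) =====
def Claim_equal_encontrar_pontos : Prop := ∀ (pixels : List (Int × Int × Int)) (largura : Int) (altura : Int), Dom_encontrar_pontos pixels largura altura → Pre_encontrar_pontos pixels largura altura → Spec_encontrar_pontos pixels largura altura (encontrar_pontos pixels largura altura)

-- ===== LEMMAS AND PROOFS =====

-- proof-side abbreviations
def pvRed : Int × Int × Int := (255, 0, 0)
def pvGreen : Int × Int × Int := (0, 255, 0)
def pvPix (pixels : List (Int × Int × Int)) (i : Int) : Int × Int × Int :=
  PySem.List.pyGetD pixels i (0, 0, 0)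
def pvG (w i : Int) : Int × Int := (PySem.Int.mod i w, PySem.Int.floordiv i w)
def pvStep (pixels : List (Int × Int × Int)) (w : Int)
    (st : Option (Int × Int) × Option (Int × Int)) (i : Int) :
    Option (Int × Int) × Option (Int × Int) :=
  if pvPix pixels i = pvRed then (some (pvG w i), st.2)
  else if pvPix pixels i = pvGreen then (st.1, some (pvG w i))
  else st

lemma pvRed_ne_green : pvRed ≠ pvGreen := by decide

-- B's loop returns, for each colour, the incoming value if already set, else the first hit in its list
lemma pvAltLoop_char (pixels : List (Int × Int × Int)) (w : Int) (M : List Int) :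
    ∀ (a b : Option (Int × Int)),
      pvAltLoop pixels w M a b =
        (a.or ((M.find? (fun i => pvPix pixels i == pvRed)).map (pvG w)),
         b.or ((M.find? (fun i => pvPix pixels i == pvGreen)).map (pvG w))) := by
  induction M with
  | nil => intro a b; simp [pvAltLoop]
  | cons i M ih =>
    intro a b
    have hgr : ((0:Int), (255:Int), (0:Int)) ≠ ((255:Int), (0:Int), (0:Int)) := by decide
    by_cases hr : PySem.List.pyGetD pixels i (0, 0, 0) = ((255:Int), (0:Int), (0:Int))
    · have hg : ¬ PySem.List.pyGetD pixels i (0, 0, 0) = ((0:Int), (255:Int), (0:Int)) := by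
        rw [hr]; exact Ne.symm hgr
      rcases a with _ | pa <;> rcases b with _ | pb <;>
        simp [pvAltLoop, ih, hr, hg, pvPix, pvRed, pvGreen, pvG, List.find?_cons]
    · by_cases hg : PySem.List.pyGetD pixels i (0, 0, 0) = ((0:Int), (255:Int), (0:Int))
      · rcases a with _ | pa <;> rcases b with _ | pb <;>
          simp [pvAltLoop, ih, hr, hg, pvPix, pvRed, pvGreen, pvG, List.find?_cons]
      · rcases a with _ | pa <;> rcases b with _ | pb <;>
          simp [pvAltLoop, ih, hr, hg, pvPix, pvRed, pvGreen, List.find?_cons]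

-- A's overwrite fold returns, for each colour, the last hit, else the initial value
lemma pvFwd_char (pixels : List (Int × Int × Int)) (w : Int) (L : List Int) :
    ∀ (a b : Option (Int × Int)),
      L.foldl (pvStep pixels w) (a, b) =
        (((L.reverse.find? (fun i => pvPix pixels i == pvRed)).map (pvG w)).or a,
         ((L.reverse.find? (fun i => pvPix pixels i == pvGreen)).map (pvG w)).or b) := by
  induction L with
  | nil => intro a b; simp
  | cons i L ih =>
    intro a b
    simp only [List.foldl_cons, List.reverse_cons, List.find?_append]
    rw [← Prod.mk.eta (p := pvStep pixels w (a, b) i), ih]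
    have hne : (pvRed == pvGreen) = false := by decide
    have hne' : (pvGreen == pvRed) = false := by decide
    have hgr : pvGreen ≠ pvRed := by decide
    have hrg : pvRed ≠ pvGreen := by decide
    by_cases hr : pvPix pixels i = pvRed
    · have hg : ¬ pvPix pixels i = pvGreen := by rw [hr]; exact pvRed_ne_green
      rcases hFR : L.reverse.find? (fun i => pvPix pixels i == pvRed) with _ | j <;>
        rcases hFG : L.reverse.find? (fun i => pvPix pixels i == pvGreen) with _ | j' <;>
        simp [pvStep, hr, hg, hFR, hFG, hne, hne', hgr, hrg, List.find?_cons, Option.or]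
    · by_cases hg : pvPix pixels i = pvGreen
      · rcases hFR : L.reverse.find? (fun i => pvPix pixels i == pvRed) with _ | j <;>
          rcases hFG : L.reverse.find? (fun i => pvPix pixels i == pvGreen) with _ | j' <;>
          simp [pvStep, hr, hg, hFR, hFG, hne, hne', hgr, hrg, List.find?_cons, Option.or]
      · simp [pvStep, hr, hg, List.find?_cons]

-- shift a 0-based inner range
lemma pvFold_shift {S : Type} (F : S → Int → S) (w c : Int) (st : S) :
    (PySem.List.pyRange 0 w 1).foldl (fun st x => F st (c + x)) st
      = (PySem.List.pyRange c (c + w) 1).foldl F st := by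
  rw [PySem.List.pyRange_one 0 w, PySem.List.pyRange_one c (c + w)]
  simp [List.foldl_map]

-- collapse the nested y/x fold into one fold over the flat index range
lemma pvDouble_fold {S : Type} (F : S → Int → S) (w : Int) (hw : 0 ≤ w) (n : Nat) :
    ∀ (init : S),
    (PySem.List.pyRange 0 (n : Int) 1).foldl
        (fun st y => (PySem.List.pyRange 0 w 1).foldl (fun st x => F st (y * w + x)) st) init
      = (PySem.List.pyRange 0 ((n : Int) * w) 1).foldl F init := by
  induction n with
  | zero => intro init; simp [PySem.List.pyRange_one_eq_nil]
  | succ n ih =>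
    intro init
    have hcast : ((n + 1 : Nat) : Int) = (n : Int) + 1 := by push_cast; ring
    rw [hcast, PySem.List.pyRange_one_succ_right (by positivity), List.foldl_append]
    simp only [List.foldl_cons, List.foldl_nil]
    rw [ih init, pvFold_shift F w ((n : Int) * w)]
    rw [PySem.List.pyRange_one_append 0 ((n : Int) * w) (((n : Int) + 1) * w)
      (by positivity) (by nlinarith), List.foldl_append]
    have : (n : Int) * w + w = ((n : Int) + 1) * w := by ring
    rw [this]

-- matriz[y][x] = pixels[y*w+x] inside the area
lemma pvCell_eq (pixels : List (Int × Int × Int)) (w h y x : Int)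
    (hw : 0 < w) (hy0 : 0 ≤ y) (hy : y < h) (hx0 : 0 ≤ x) (hx : x < w)
    (hlen : w * h ≤ (pixels.length : Int)) :
    PySem.List.pyGetD
      (PySem.List.pyGetD
        ((PySem.List.pyRange 0 h 1).map
          (fun i => PySem.List.slice pixels (some (i * w)) (some ((i + 1) * w)))) y [])
      x (0, 0, 0) = pvPix pixels (y * w + x) := by
  have hyw : (0:Int) ≤ y * w := by positivity
  have hyw1 : (0:Int) ≤ (y + 1) * w := by positivity
  have hy1len : y * w + w ≤ (pixels.length : Int) := by nlinarith
  rw [PySem.List.pyGetD_map_pyRange_of_nonneg _ h y _ hy0 hy]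
  rw [PySem.List.slice_toNat _ hyw hyw1]
  have htn : ((y + 1) * w).toNat - (y * w).toNat = w.toNat := by
    have e1 : (y + 1) * w = y * w + w := by ring
    rw [e1]; omega
  rw [htn]
  have hxlen : x < ((List.take w.toNat (List.drop (y * w).toNat pixels)).length : Int) := by
    simp [List.length_take, List.length_drop]; omega
  rw [PySem.List.pyGetD_eq_getElem _ _ hx0 hxlen]
  have hix : 0 ≤ y * w + x := by positivity
  have hixlen : y * w + x < (pixels.length : Int) := by omega
  unfold pvPix
  rw [PySem.List.pyGetD_eq_getElem _ _ hix hixlen]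
  simp only [List.getElem_take, List.getElem_drop]
  have : (y * w).toNat + x.toNat = (y * w + x).toNat := by omega
  simp [this]

lemma pvG_eq (w y x : Int) (hw : 0 < w) (hx0 : 0 ≤ x) (hx : x < w) :
    pvG w (y * w + x) = (x, y) := by
  unfold pvG
  have h1 : PySem.Int.mod (y * w + x) w = x := by
    rw [PySem.Int.mod_eq_emod_of_pos hw, add_comm, mul_comm, Int.add_mul_emod_self_left,
      Int.emod_eq_of_lt hx0 hx]
  have h2 : PySem.Int.floordiv (y * w + x) w = y := by
    rw [PySem.Int.floordiv_eq_iff_of_pos hw]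
    constructor <;> nlinarith
  rw [h1, h2]

-- ===== VERDICT (by name: the statement is the Claim_ definition above) =====
theorem encontrar_pontos_spec : Claim_equal_encontrar_pontos := by
  intro pixels w h _ hpre
  unfold Spec_encontrar_pontos
  simp only [encontrar_pontos, encontrar_pontos_alt, Prod.mk.injEq]
  refine ⟨trivial, ?_⟩
  by_cases hw : w ≤ 0
  · rw [PySem.List.pyRange_one_eq_nil hw, if_neg (by omega)]
    simp only [List.foldl_nil]
    exact List.foldl_fixed _
  · rw [not_le] at hw
    by_cases hh : h ≤ 0
    · rw [PySem.List.pyRange_one_eq_nil hh, if_pos hw,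
        PySem.List.pyRange_neg_one_eq_nil (by nlinarith)]
      simp [pvAltLoop]
    · rw [not_le] at hh
      have hlen : w * h ≤ (pixels.length : Int) := by
        rcases hpre with h1 | h2 | h3
        · omega
        · omega
        · exact h3
      obtain ⟨n, rfl⟩ : ∃ n : Nat, h = (n : Int) :=
        ⟨h.toNat, (Int.toNat_of_nonneg (le_of_lt hh)).symm⟩
      -- A side: turn the nested fold into a flat fold of pvStep
      have hA : (PySem.List.pyRange 0 (n : Int) 1).foldl (fun st y =>
          (PySem.List.pyRange 0 w 1).foldl (fun st x =>
            if PySem.List.pyGetD (PySem.List.pyGetD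
                ((PySem.List.pyRange 0 (n : Int) 1).map
                  (fun i => PySem.List.slice pixels (some (i * w)) (some ((i + 1) * w)))) y [])
                x (0, 0, 0) = ((255:Int), (0:Int), (0:Int)) then (some (x, y), st.2)
            else if PySem.List.pyGetD (PySem.List.pyGetD
                ((PySem.List.pyRange 0 (n : Int) 1).map
                  (fun i => PySem.List.slice pixels (some (i * w)) (some ((i + 1) * w)))) y [])
                x (0, 0, 0) = ((0:Int), (255:Int), (0:Int)) then (st.1, some (x, y))
            else st) st) ((none, none) : Option (Int × Int) × Option (Int × Int))
          = (PySem.List.pyRange 0 ((n : Int) * w) 1).foldl (pvStep pixels w) (none, none) := by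
        rw [PySem.List.foldl_congr_mem (g := fun st y =>
          (PySem.List.pyRange 0 w 1).foldl (fun st x => pvStep pixels w st (y * w + x)) st)]
        · exact pvDouble_fold (pvStep pixels w) w (le_of_lt hw) n (none, none)
        · intro acc y hy
          rw [PySem.List.mem_pyRange_one] at hy
          apply PySem.List.foldl_congr_mem
          intro acc2 x hx
          rw [PySem.List.mem_pyRange_one] at hx
          rw [pvCell_eq pixels w (n : Int) y x hw hy.1 hy.2 hx.1 hx.2 hlen]
          rw [show ((x : Int), y) = pvG w (y * w + x) from
            (pvG_eq w y x hw hx.1 hx.2).symm]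
          simp only [pvStep, pvRed, pvGreen]
          rfl
      rw [hA, pvFwd_char pixels w _ none none, if_pos hw]
      have hB : PySem.List.pyRange (w * (n : Int) - 1) (-1) (-1)
          = (PySem.List.pyRange 0 ((n : Int) * w) 1).reverse := by
        rw [PySem.List.pyRange_neg_one_eq_reverse]
        norm_num [mul_comm]
      rw [hB, pvAltLoop_char pixels w _ none none]
      simp
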